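-- pv_equiv track=rewrite | github.com/YuJ-ZHU/JavSP | javsp/file.py | _split_output_pattern
-- ===== SOURCE A (Python) =====
-- def _split_output_pattern(pattern: str) -> tuple[str, list[str]]:
--     """将路径模板拆分为纯文本前缀和剩余的段列表"""
--     normalized = pattern.replace('\\', '/').strip()
--     first_placeholder = normalized.find('{')
--     if first_placeholder == -1:
--         base = normalized
--         tail = ''
--     else:
--         last_sep = normalized.rfind('/', 0, first_placeholder)
--         if last_sep == -1:
--             base = ''
--             tail = normalized
--         else:
--             base = normalized[:last_sep]
--             tail = normalized[last_sep+1:]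
--     base = base.rstrip('/')
--     segments = [seg for seg in tail.split('/') if seg]
--     return base, segments
-- ===== SOURCE B (Python) =====
-- def _split_output_pattern(pattern: str) -> tuple[str, list[str]]:
--     """Split-then-scan: cut the normalized pattern into '/'-segments and look for
--     the first segment carrying a placeholder, instead of find/rfind index arithmetic."""
--     normalized = pattern.replace('\\', '/').strip()
--     parts = normalized.split('/')
--     for i, seg in enumerate(parts):
--         if '{' in seg:
--             return '/'.join(parts[:i]).rstrip('/'), [s for s in parts[i:] if s]
--     return normalized.rstrip('/'), []
-- ===== Notes on version B (the rewrite author's own statement) =====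
-- stated objective: idiomatic
-- what changed: B splits the normalized pattern into '/'-segments once and scans for the first segment containing '{', joining the earlier segments for the base, instead of A's find/rfind character-index arithmetic and slicing.
import Mathlib
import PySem

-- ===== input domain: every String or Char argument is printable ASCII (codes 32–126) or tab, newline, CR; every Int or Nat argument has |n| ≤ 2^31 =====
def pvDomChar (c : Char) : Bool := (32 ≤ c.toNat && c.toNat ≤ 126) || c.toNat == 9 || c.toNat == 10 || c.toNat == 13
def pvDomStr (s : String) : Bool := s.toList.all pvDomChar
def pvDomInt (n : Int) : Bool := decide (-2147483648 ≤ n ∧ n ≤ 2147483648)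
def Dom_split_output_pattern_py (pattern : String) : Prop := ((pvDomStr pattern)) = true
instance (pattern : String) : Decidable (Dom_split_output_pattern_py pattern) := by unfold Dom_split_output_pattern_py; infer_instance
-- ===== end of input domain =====

-- B splits the pattern into '/'-segments and scans for the first one containing '{' (idiomatic
-- decomposition); A uses find/rfind character-index arithmetic and slicing. Same value everywhere.

-- ===== PORT A =====
-- hand port of Python's str.rstrip('/') (exact: removes exactly the trailing '/' characters);
-- both Pythons call base.rstrip('/'), so both ports share this primitive
def rstripSlash (cs : List Char) : List Char :=
  (cs.reverse.dropWhile (fun c => c == '/')).reverse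

def split_output_pattern_py (pattern : String) : String × List String :=
  let normalized := PySem.Chars.strip (PySem.Chars.replace pattern.toList ['\\'] ['/'])
  let firstPlaceholder := PySem.Chars.find normalized ['{']
  let bt : List Char × List Char :=
    if firstPlaceholder = -1 then (normalized, [])
    else
      let lastSep := PySem.Chars.rfindFrom normalized ['/'] 0 (some firstPlaceholder)
      if lastSep = -1 then ([], normalized)
      else (PySem.Chars.slice normalized none (some lastSep),
            PySem.Chars.slice normalized (some (lastSep + 1)) none)
  let base := rstripSlash bt.1
  let segments := (PySem.Chars.splitOn bt.2 ['/']).filter (fun seg => seg ≠ [])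
  (String.ofList base, segments.map String.ofList)

-- ===== PORT B =====
def split_output_pattern_py_alt (pattern : String) : String × List String :=
  let normalized := PySem.Chars.strip (PySem.Chars.replace pattern.toList ['\\'] ['/'])
  let parts := PySem.Chars.splitOn normalized ['/']
  match parts.findIdx? (fun seg => PySem.Chars.isIn ['{'] seg) with
  | some i =>
      (String.ofList (rstripSlash (PySem.Chars.join ['/'] (parts.take i))),
       ((parts.drop i).filter (fun seg => seg ≠ [])).map String.ofList)
  | none => (String.ofList (rstripSlash normalized), [])

-- ===== PRECONDITION & SPEC =====
def Spec_split_output_pattern_py (pattern : String) (out : String × List String) : Prop := out = split_output_pattern_py_alt pattern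
instance (pattern : String) (out : String × List String) : Decidable (Spec_split_output_pattern_py pattern out) := by unfold Spec_split_output_pattern_py; infer_instance

-- ===== CLAIM (what is proved, stated in full; the proofs are below) =====
def Claim_equal_split_output_pattern_py : Prop := ∀ (pattern : String), Dom_split_output_pattern_py pattern → Spec_split_output_pattern_py pattern (split_output_pattern_py pattern)

-- ===== LEMMAS AND PROOFS =====

-- step lemma for Mathlib's List.splitOn on Char
theorem splitOn_cons (c x : Char) (xs : List Char) :
    (x :: xs).splitOn c =
      if x = c then [] :: xs.splitOn c else (xs.splitOn c).modifyHead (List.cons x) := by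
  simp [List.splitOn, List.splitOnP_cons]

theorem isPrefixOf_singleton (c : Char) (l : List Char) :
    [c].isPrefixOf l = true ↔ l.head? = some c := by
  cases l with
  | nil => simp [List.isPrefixOf]
  | cons a t => simp [List.isPrefixOf]; exact eq_comm

theorem singleton_prefix (c : Char) (l : List Char) :
    [c] <+: l ↔ l.head? = some c := by
  cases l with
  | nil => simp
  | cons a t => simp [List.cons_prefix_iff]

theorem modifyHead_nilfun (l : List (List Char)) :
    List.modifyHead (fun h => h) l = l := by
  cases l <;> simp

-- PySem's fueled splitOn agrees with Mathlib's List.splitOn (single-char separator)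
theorem splitOn_go_inv (c : Char) (fuel : Nat) :
    ∀ (l cur : List Char) (acc : List (List Char)), l.length ≤ fuel →
      PySem.Chars.splitOn.go [c] fuel l cur acc =
        acc.reverse ++ (l.splitOn c).modifyHead (fun h => cur.reverse ++ h) := by
  induction fuel with
  | zero =>
    intro l cur acc hl
    have : l = [] := List.eq_nil_of_length_eq_zero (Nat.le_zero.mp hl)
    subst this
    simp [PySem.Chars.splitOn.go]
  | succ f ih =>
    intro l cur acc hl
    cases l with
    | nil => simp [PySem.Chars.splitOn.go]
    | cons x rest =>
      rw [PySem.Chars.splitOn.go]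
      by_cases hx : x = c
      · have hp : [c].isPrefixOf (x :: rest) = true := by
          rw [isPrefixOf_singleton]; simp [hx]
        rw [hp]
        simp only [if_true]
        rw [ih _ _ _ (by simpa using Nat.le_of_succ_le_succ hl)]
        simp [splitOn_cons, hx, modifyHead_nilfun]
      · have hp : [c].isPrefixOf (x :: rest) = false := by
          rw [Bool.eq_false_iff]
          intro h; rw [isPrefixOf_singleton] at h; simp at h; exact hx h
        rw [hp]
        simp only [Bool.false_eq_true, if_false]
        rw [ih _ _ _ (by simpa using Nat.le_of_succ_le_succ hl)]
        rw [splitOn_cons, if_neg hx, List.modifyHead_modifyHead]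
        have hf : (fun h => (x :: cur).reverse ++ h) = ((fun h => cur.reverse ++ h) ∘ List.cons x) := by
          funext h; simp
        rw [hf]

theorem pysplitOn_eq (cs : List Char) (c : Char) :
    PySem.Chars.splitOn cs [c] = cs.splitOn c := by
  rw [PySem.Chars.splitOn, splitOn_go_inv c _ _ _ _ (by omega)]
  simp [modifyHead_nilfun]

theorem splitOn_ne_nil (c : Char) (l : List Char) : l.splitOn c ≠ [] := by
  simp [List.splitOn]; exact List.splitOnP_ne_nil _ _

theorem modifyHead_append_of_ne_nil (f : List Char → List Char) (s t : List (List Char))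
    (h : s ≠ []) : (s ++ t).modifyHead f = s.modifyHead f ++ t := by
  cases s with
  | nil => exact absurd rfl h
  | cons a s' => simp

theorem splitOn_append (c : Char) (xs ys : List Char) :
    (xs ++ c :: ys).splitOn c = xs.splitOn c ++ ys.splitOn c := by
  induction xs with
  | nil => simp [splitOn_cons, List.splitOn_nil]
  | cons x xs ih =>
    by_cases hx : x = c
    · simp only [List.cons_append, splitOn_cons, if_pos hx, ih]
    · simp only [List.cons_append, splitOn_cons, if_neg hx, ih,
        modifyHead_append_of_ne_nil _ _ _ (splitOn_ne_nil c xs)]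

theorem head?_splitOn (c : Char) (cs : List Char) :
    (cs.splitOn c).head? = some (cs.takeWhile (fun x => x ≠ c)) := by
  induction cs with
  | nil => simp [List.splitOn_nil]
  | cons x xs ih =>
    by_cases hx : x = c
    · simp [splitOn_cons, hx]
    · rw [splitOn_cons, if_neg hx]
      cases h : xs.splitOn c with
      | nil => exact absurd h (splitOn_ne_nil c xs)
      | cons a t =>
        rw [h] at ih
        simp at ih
        simp [hx, ih]

theorem mem_intercalate (sep : List Char) (parts : List (List Char)) (seg : List Char) (x : Char)
    (hseg : seg ∈ parts) (hx : x ∈ seg) : x ∈ sep.intercalate parts := by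
  induction parts with
  | nil => simp at hseg
  | cons a t ih =>
    cases t with
    | nil =>
      simp at hseg
      subst hseg
      simpa [List.intercalate] using hx
    | cons b t' =>
      have hstep : sep.intercalate (a :: b :: t') = a ++ sep ++ sep.intercalate (b :: t') := by
        simp [List.intercalate, List.intersperse]
      rw [hstep]
      rcases List.mem_cons.mp hseg with h1 | h2
      · subst h1; simp [hx]
      · simp [ih h2]

theorem mem_of_mem_splitOn (c : Char) (cs seg : List Char) (x : Char)
    (hseg : seg ∈ cs.splitOn c) (hx : x ∈ seg) : x ∈ cs := by
  have h := List.intercalate_splitOn cs c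
  rw [← h]
  exact mem_intercalate _ _ _ _ hseg hx

-- rfind.go for a single-char needle: -1 when the char is absent …
theorem rfind_go_none (c : Char) (s : List Char) (k : Nat)
    (h : ∀ j : Nat, s[j]? ≠ some c) : PySem.Chars.rfind.go s [c] k = -1 := by
  induction k with
  | zero =>
    rw [PySem.Chars.rfind.go]
    have : [c].isPrefixOf s ≠ true := by
      rw [Ne, isPrefixOf_singleton]
      have h0 := h 0; rw [← List.head?_eq_getElem?] at h0; exact h0
    simp [this]
  | succ j ih =>
    rw [PySem.Chars.rfind.go]
    have : [c].isPrefixOf (s.drop (j+1)) ≠ true := by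
      rw [Ne, isPrefixOf_singleton, List.head?_drop]
      exact h (j+1)
    simp only [Bool.not_eq_true] at this
    rw [this]
    simpa using ih

-- … and the index of the last occurrence otherwise
theorem rfind_go_last (c : Char) (s : List Char) (k m : Nat)
    (hm : s[m]? = some c) (hmk : m ≤ k)
    (hmax : ∀ j : Nat, m < j → s[j]? ≠ some c) :
    PySem.Chars.rfind.go s [c] k = (m : Int) := by
  induction k with
  | zero =>
    have hm0 : m = 0 := Nat.le_zero.mp hmk
    subst hm0
    rw [PySem.Chars.rfind.go]
    have : [c].isPrefixOf s = true := by
      rw [isPrefixOf_singleton]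
      rw [← List.head?_eq_getElem?] at hm; exact hm
    simp [this]
  | succ j ih =>
    rw [PySem.Chars.rfind.go]
    by_cases hje : m = j + 1
    · have : [c].isPrefixOf (s.drop (j+1)) = true := by
        rw [isPrefixOf_singleton, List.head?_drop, ← hje]; exact hm
      simp [this, hje]
    · have hmj : m ≤ j := by omega
      have : [c].isPrefixOf (s.drop (j+1)) ≠ true := by
        rw [Ne, isPrefixOf_singleton, List.head?_drop]
        exact hmax (j+1) (by omega)
      simp only [Bool.not_eq_true] at this
      rw [this]
      simpa using ih hmj

-- Python's s.rfind('/', 0, e) for 0 ≤ e ≤ len(s) is rfind on the prefix s[:e]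
theorem rfindFrom_zero (cs sub : List Char) (e : Int) (h0 : 0 ≤ e) (hl : e ≤ (cs.length : Int)) :
    PySem.Chars.rfindFrom cs sub 0 (some e) =
      (if PySem.Chars.rfind (cs.take e.toNat) sub = -1 then -1
       else 0 + PySem.Chars.rfind (cs.take e.toNat) sub) := by
  rw [PySem.Chars.rfindFrom]
  have h1 : ¬ ((cs.length : Int) < e) := by omega
  have h2 : ¬ (e < (0:Int)) := by omega
  simp [h1, h2]
theorem exists_last_split (c : Char) (l : List Char) (h : c ∈ l) :
    ∃ p1 p2, l = p1 ++ c :: p2 ∧ c ∉ p2 := by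
  induction l with
  | nil => simp at h
  | cons x t ih =>
    by_cases hct : c ∈ t
    · obtain ⟨p1, p2, heq, hnp⟩ := ih hct
      exact ⟨x :: p1, p2, by simp [heq], hnp⟩
    · have hx : x = c := by
        rcases List.mem_cons.mp h with h1 | h2
        · exact h1.symm
        · exact absurd h2 hct
      exact ⟨[], t, by simp [hx], hct⟩

theorem core_eq (pattern : String) :
    split_output_pattern_py pattern = split_output_pattern_py_alt pattern := by
  simp only [split_output_pattern_py, split_output_pattern_py_alt]
  generalize (PySem.Chars.strip (PySem.Chars.replace pattern.toList ['\\'] ['/'])) = cs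
  by_cases h1 : PySem.Chars.find cs ['{'] = -1
  · rw [if_pos h1]
    have hnotmem : '{' ∉ cs := by
      intro hmem
      have := (PySem.Chars.find_eq_neg_one_iff cs ['{']).mp h1
      exact this ((List.singleton_infix_iff '{' cs).mpr hmem)
    have hnone : (PySem.Chars.splitOn cs ['/']).findIdx? (fun seg => PySem.Chars.isIn ['{'] seg) = none := by
      rw [List.findIdx?_eq_none_iff]
      intro seg hseg
      rw [PySem.Chars.isIn_eq_false_iff]
      intro hinf
      exact hnotmem (mem_of_mem_splitOn '/' cs seg '{'
        (by rwa [pysplitOn_eq] at hseg) ((List.singleton_infix_iff '{' seg).mp hinf))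
    rw [hnone]
    simp [pysplitOn_eq, List.splitOn_nil]
  · rw [if_neg h1]
    have hge : 0 ≤ PySem.Chars.find cs ['{'] := by
      have := PySem.Chars.neg_one_le_find cs ['{']
      omega
    have hle := PySem.Chars.find_le_length cs ['{']
    obtain ⟨hpref, hmin⟩ := PySem.Chars.find_spec (sub := ['{']) (s := cs) hge
    set n := (PySem.Chars.find cs ['{']).toNat with hn
    have hfpn : PySem.Chars.find cs ['{'] = (n : Int) := (Int.toNat_of_nonneg hge).symm
    have hnle : n ≤ cs.length := by omega
    have hhead : cs[n]? = some '{' := by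
      rw [← List.head?_drop]
      exact (singleton_prefix '{' _).mp hpref
    have hnlt : n < cs.length := by
      rcases List.getElem?_eq_some_iff.mp hhead with ⟨h, _⟩
      exact h
    set pre := cs.take n with hpre_def
    set suf := cs.drop (n+1) with hsuf_def
    have hcs : cs = pre ++ '{' :: suf := by
      conv_lhs => rw [← List.take_append_drop n cs]
      rw [List.drop_eq_getElem_cons hnlt]
      congr 2
      rcases List.getElem?_eq_some_iff.mp hhead with ⟨_, h⟩
      exact h
    have hprelen : pre.length = n := by
      simp [hpre_def, hnle]
    have hprenb : '{' ∉ pre := by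
      intro hmem
      obtain ⟨i, hi, hgi⟩ := List.mem_iff_getElem.mp hmem
      have hilt : i < n := by omega
      apply hmin i hilt
      rw [singleton_prefix, List.head?_drop]
      rw [List.getElem?_eq_some_iff]
      refine ⟨by omega, ?_⟩
      rw [← hgi]
      exact (List.getElem_take).symm
    rw [hfpn, rfindFrom_zero cs ['/'] (n : Int) (by omega) (by omega)]
    have htn : ((n : Int)).toNat = n := by omega
    rw [htn]
    rw [PySem.Chars.rfind]
    by_cases h2 : '/' ∈ pre
    · obtain ⟨p1, p2, hpeq, hp2⟩ := exists_last_split '/' pre h2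
      have hplen : pre.length = p1.length + 1 + p2.length := by
        rw [hpeq]; simp [List.length_append]; omega
      have hlast : PySem.Chars.rfind.go (cs.take n) ['/'] (cs.take n).length = (p1.length : Int) := by
        rw [← hpre_def]
        apply rfind_go_last
        · rw [hpeq, List.getElem?_append_right (le_refl _)]
          simp
        · omega
        · intro j hj
          rw [hpeq]
          rw [List.getElem?_append_right (by omega : p1.length ≤ j)]
          have hj1 : j - p1.length = (j - p1.length - 1) + 1 := by omega
          rw [hj1, List.getElem?_cons_succ]
          cases hq : p2[j - p1.length - 1]? with
          | none => simp
          | some x =>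
            intro hx
            have hx' : x = '/' := by injection hx
            subst hx'
            exact hp2 (List.mem_of_getElem? hq)
      rw [hlast]
      have hne1 : ¬((p1.length : Int) = -1) := by omega
      rw [if_neg hne1]
      have hne2 : ¬((0 + (p1.length : Int)) = -1) := by omega
      rw [if_neg hne2]
      have hcs2 : cs = p1 ++ '/' :: (p2 ++ '{' :: suf) := by
        rw [hcs, hpeq]; simp
      have hsl1 : PySem.Chars.slice cs none (some (0 + (p1.length : Int))) = p1 := by
        rw [PySem.Chars.slice_eq_listSlice, PySem.List.slice_to _ (by omega)]
        have ht : (0 + (p1.length : Int)).toNat = p1.length := by omega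
        rw [ht]
        conv_lhs => rw [hcs2]
        exact List.take_left
      have hsl2 : PySem.Chars.slice cs (some (0 + (p1.length : Int) + 1)) none = p2 ++ '{' :: suf := by
        rw [PySem.Chars.slice_eq_listSlice, PySem.List.slice_from _ (by omega)]
        have ht : (0 + (p1.length : Int) + 1).toNat = (p1 ++ ['/']).length := by
          simp
        rw [ht]
        conv_lhs => rw [hcs2]
        rw [show p1 ++ '/' :: (p2 ++ '{' :: suf) = (p1 ++ ['/']) ++ (p2 ++ '{' :: suf) by simp]
        exact List.drop_left
      rw [hsl1, hsl2]
      have hsplit : cs.splitOn '/' = p1.splitOn '/' ++ (p2 ++ '{' :: suf).splitOn '/' := by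
        conv_lhs => rw [hcs2]
        exact splitOn_append '/' p1 _
      have hnb1 : '{' ∉ p1 := fun hm => hprenb (by rw [hpeq]; exact List.mem_append_left _ hm)
      have hfirst : (p1.splitOn '/').findIdx? (fun seg => PySem.Chars.isIn ['{'] seg) = none := by
        rw [List.findIdx?_eq_none_iff]
        intro seg hseg
        rw [PySem.Chars.isIn_eq_false_iff]
        intro hinf
        exact hnb1 (mem_of_mem_splitOn '/' p1 seg '{' hseg ((List.singleton_infix_iff '{' seg).mp hinf))
      have htw2 : (p2 ++ '{' :: suf).takeWhile (fun x => x ≠ '/') =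
          p2 ++ '{' :: suf.takeWhile (fun x => x ≠ '/') := by
        rw [List.takeWhile_append_of_pos]
        · rw [List.takeWhile_cons]
          simp
        · intro x hx
          simp only [ne_eq, decide_eq_true_eq]
          intro hxe
          exact hp2 (hxe ▸ hx)
      have hh2 : ((p2 ++ '{' :: suf).splitOn '/').head? =
          some (p2 ++ '{' :: suf.takeWhile (fun x => x ≠ '/')) := by
        rw [head?_splitOn, htw2]
      cases hsp : (p2 ++ '{' :: suf).splitOn '/' with
      | nil => exact absurd hsp (splitOn_ne_nil '/' _)
      | cons h0 t =>
        rw [hsp] at hh2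
        simp only [List.head?_cons, Option.some.injEq] at hh2
        have hfi : (PySem.Chars.splitOn cs ['/']).findIdx? (fun seg => PySem.Chars.isIn ['{'] seg) =
            some ((p1.splitOn '/').length) := by
          rw [pysplitOn_eq, hsplit, List.findIdx?_append, hfirst, hsp, List.findIdx?_cons]
          have hisin : PySem.Chars.isIn ['{'] h0 = true := by
            rw [PySem.Chars.isIn_iff_infix, List.singleton_infix_iff, hh2]
            simp
          rw [hisin]
          simp
        rw [hfi]
        simp only [pysplitOn_eq]
        rw [hsplit, List.take_left, List.drop_left, hsp]
        have hjoin : PySem.Chars.join ['/'] (p1.splitOn '/') = p1 := by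
          rw [PySem.Chars.join]
          exact List.intercalate_splitOn p1 '/'
        rw [hjoin]
    · -- no '/' before the first '{'
      have hnone : PySem.Chars.rfind.go (cs.take n) ['/'] (cs.take n).length = -1 := by
        apply rfind_go_none
        intro j
        cases hj : (cs.take n)[j]? with
        | none => simp
        | some x =>
          intro hx
          have hx' : x = '/' := by injection hx
          subst hx'
          exact h2 (by rw [← hpre_def] at hj; exact List.mem_of_getElem? hj)
      rw [hnone]
      rw [if_pos rfl, if_pos rfl]
      -- A side is ([], cs); B side: first segment of the split contains '{'
      have htw : cs.takeWhile (fun x => x ≠ '/') = pre ++ '{' :: suf.takeWhile (fun x => x ≠ '/') := by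
        conv_lhs => rw [hcs]
        rw [List.takeWhile_append_of_pos]
        · rw [List.takeWhile_cons]
          simp
        · intro x hx
          simp only [ne_eq, decide_eq_true_eq]
          intro hxe
          exact h2 (hxe ▸ hx)
      have hh : (cs.splitOn '/').head? = some (pre ++ '{' :: suf.takeWhile (fun x => x ≠ '/')) := by
        rw [head?_splitOn, htw]
      cases hsp : cs.splitOn '/' with
      | nil => exact absurd hsp (splitOn_ne_nil '/' cs)
      | cons h0 t =>
        rw [hsp] at hh
        simp only [List.head?_cons, Option.some.injEq] at hh
        have hfi : (PySem.Chars.splitOn cs ['/']).findIdx? (fun seg => PySem.Chars.isIn ['{'] seg) = some 0 := by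
          rw [pysplitOn_eq, hsp, List.findIdx?_cons]
          have : PySem.Chars.isIn ['{'] h0 = true := by
            rw [PySem.Chars.isIn_iff_infix, List.singleton_infix_iff, hh]
            simp
          rw [this]
          simp
        rw [hfi]
        simp [pysplitOn_eq, hsp, rstripSlash, PySem.Chars.join, List.intercalate]

-- ===== VERDICT (by name: the statement is the Claim_ definition above) =====
theorem split_output_pattern_py_spec : Claim_equal_split_output_pattern_py := by
  intro pattern _
  unfold Spec_split_output_pattern_py
  exact core_eq pattern
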